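-- pv_equiv track=rewrite | github.com/maximkiseliov/CryptographySAFER | SAFER.py | get_binar
-- ===== SOURCE A (Python) =====
-- def get_binar(obj):
--     '''GET BINAR AND ORD LISTS FROM CHARACTERS'''
--     list_of_ord = []
--     list_of_binar = []
--
--     for i in obj:
--         temp = '{0:08b}'.format(ord(i))
--         list_of_ord.append(ord(i))
--         list_of_binar.append('{0:08b}'.format(ord(i)))
--
--     return list_of_binar, list_of_ord
-- ===== SOURCE B (Python) =====
-- def get_binar(obj):
--     '''GET BINAR AND ORD LISTS FROM CHARACTERS'''
--     list_of_ord = list(map(ord, obj))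
--     list_of_binar = []
--     for o in list_of_ord:
--         bits = []
--         n = o
--         for _ in range(8):
--             bits.append(chr(48 + (n & 1)))
--             n >>= 1
--         bits.reverse()
--         list_of_binar.append(''.join(bits))
--     return list_of_binar, list_of_ord
-- ===== Notes on version B (the rewrite author's own statement) =====
-- stated objective: alternative
-- what changed: A formats each character with a zero-padded binary format call inside one loop appending to two lists; B first maps ord over the string, then converts each code to its 8-bit string by explicit bit extraction (8 rounds of masking the low bit and shifting right, then reverse and join) instead of using format.
import Mathlib
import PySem

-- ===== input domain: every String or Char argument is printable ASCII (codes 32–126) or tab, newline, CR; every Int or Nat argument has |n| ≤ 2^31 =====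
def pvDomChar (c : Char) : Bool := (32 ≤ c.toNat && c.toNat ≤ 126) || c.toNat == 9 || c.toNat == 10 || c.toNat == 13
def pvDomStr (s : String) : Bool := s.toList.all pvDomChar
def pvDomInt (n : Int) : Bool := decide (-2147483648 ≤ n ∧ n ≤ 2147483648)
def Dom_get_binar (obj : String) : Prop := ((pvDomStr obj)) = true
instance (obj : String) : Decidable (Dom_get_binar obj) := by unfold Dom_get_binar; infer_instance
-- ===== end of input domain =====

-- B replaces format-based conversion with explicit bit extraction (n&1 / n>>1), after a separate ord pass.

-- ===== PORT A =====
-- port of Python's format(n, '08b') for n ≥ 0: binary digits zero-padded to width 8 (exact for 0 ≤ n)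
def pvFmt08b (n : Nat) : String :=
  let ds := Nat.toDigits 2 n
  String.mk (List.replicate (8 - ds.length) '0' ++ ds)

-- A's loop: appends ord(i) and the formatted string to two accumulators each step
def pvLoopA : List Char → List Int → List String → List String × List Int
  | [], ords, bins => (bins, ords)
  | c :: rest, ords, bins =>
      pvLoopA rest (ords ++ [(c.toNat : Int)]) (bins ++ [pvFmt08b c.toNat])

def get_binar (obj : String) : List String × List Int :=
  pvLoopA obj.toList [] []

-- ===== PORT B =====
-- B's inner conversion: 8 rounds appending chr(48 + (n & 1)) and halving n, then reverse and join
def pvBits8 (o : Int) : String :=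
  let st := (List.range 8).foldl
    (fun (st : List Char × Int) _ =>
      (st.1 ++ [Char.ofNat (48 + PySem.Int.mod st.2 2).toNat], PySem.Int.floordiv st.2 2))
    ([], o)
  String.mk st.1.reverse

def get_binar_alt (obj : String) : List String × List Int :=
  let list_of_ord : List Int := obj.toList.map (fun c => (c.toNat : Int))
  let list_of_binar : List String := list_of_ord.map pvBits8
  (list_of_binar, list_of_ord)

-- ===== PRECONDITION & SPEC =====
def Spec_get_binar (obj : String) (out : List String × List Int) : Prop := out = get_binar_alt obj
instance (obj : String) (out : List String × List Int) : Decidable (Spec_get_binar obj out) := by unfold Spec_get_binar; infer_instance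

-- ===== CLAIM (what is proved, stated in full; the proofs are below) =====
def Claim_equal_get_binar : Prop := ∀ (obj : String), Dom_get_binar obj → Spec_get_binar obj (get_binar obj)

-- ===== LEMMAS AND PROOFS =====

theorem pvLoopA_eq (l : List Char) (ords : List Int) (bins : List String) :
    pvLoopA l ords bins =
      (bins ++ l.map (fun c => pvFmt08b c.toNat),
       ords ++ l.map (fun c => (c.toNat : Int))) := by
  induction l generalizing ords bins with
  | nil => simp [pvLoopA]
  | cons c rest ih => simp [pvLoopA, ih]

theorem fmt_eq_bits : ∀ n : Nat, n < 128 → pvFmt08b n = pvBits8 (n : Int) := by decide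

-- ===== VERDICT (by name: the statement is the Claim_ definition above) =====
theorem get_binar_spec : Claim_equal_get_binar := by
  intro obj hdom
  unfold Spec_get_binar get_binar get_binar_alt
  rw [pvLoopA_eq]
  simp only [List.nil_append, List.map_map, Prod.mk.injEq, and_true]
  refine List.map_congr_left fun c hc => ?_
  have hd : pvDomChar c = true := by
    have := (List.all_eq_true.mp hdom) c hc
    exact this
  have hlt : c.toNat < 128 := by
    simp [pvDomChar] at hd
    omega
  exact fmt_eq_bits c.toNat hlt
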